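-- pv_equiv track=rewrite | github.com/benrose258/Python | Python 3.6 Files/Classwork/CS 115/Lab 10 Life Files/life.py | diagonalize
-- ===== SOURCE A (Python) =====
-- def createOneRow(width):
--     """Returns one row of zeros of width "width"...
--        You should use this in your
--        createBoard(width, height) function."""
--     row = []
--     for col in range(width):
--         row += [0]
--     return row
--
-- def createBoard(width,height):
--     '''Returns a 2d array with "height" rows and "width" cols.'''
--     board = []
--     for row in range(height):
--         board += [createOneRow(width)]
--     return board
--
-- def diagonalize(width,height):
--     """ creates an empty board and then modifies it
--     so that it has a diagonal strip of "on" cells.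
--     """
--     board = createBoard( width, height )
--     for row in range(height):
--         for col in range(width):
--             if row == col:
--                 board[row][col] = 1
--             else:
--                 board[row][col] = 0
--     return board
-- ===== SOURCE B (Python) =====
-- def diagonalize(width, height):
--     """ creates an empty board and then modifies it
--     so that it has a diagonal strip of "on" cells.
--     """
--     board = [[0] * width for _ in range(height)]
--     for i in range(min(width, height)):
--         board[i][i] = 1
--     return board
-- ===== Notes on version B (the rewrite author's own statement) =====
-- stated objective: simpler
-- what changed: B builds the all-zero board with a comprehension and then sets only the min(width,height) diagonal cells, instead of A's full nested cell-by-cell scan with a row==col branch.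
import Mathlib
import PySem

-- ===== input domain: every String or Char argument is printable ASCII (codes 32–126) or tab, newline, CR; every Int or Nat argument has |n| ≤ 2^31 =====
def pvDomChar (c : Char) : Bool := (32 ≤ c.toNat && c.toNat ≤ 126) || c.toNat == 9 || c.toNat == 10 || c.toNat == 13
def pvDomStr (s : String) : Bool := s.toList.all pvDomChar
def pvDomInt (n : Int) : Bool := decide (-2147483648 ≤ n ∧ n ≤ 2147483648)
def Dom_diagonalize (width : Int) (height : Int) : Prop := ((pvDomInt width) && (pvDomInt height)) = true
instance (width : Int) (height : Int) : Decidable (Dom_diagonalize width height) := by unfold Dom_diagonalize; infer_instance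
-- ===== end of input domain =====

-- B replaces A's full nested cell-by-cell scan (with its row==col branch) by building the
-- all-zero board and then setting only the min(width,height) diagonal cells (objective: simpler).

-- ===== PORT A =====
def createOneRow (width : Int) : List Int :=
  (PySem.List.pyRange 0 width 1).foldl (fun row _ => row ++ [0]) []

def createBoard (width : Int) (height : Int) : List (List Int) :=
  (PySem.List.pyRange 0 height 1).foldl (fun board _ => board ++ [createOneRow width]) []

def diagonalize (width : Int) (height : Int) : List (List Int) :=
  (PySem.List.pyRange 0 height 1).foldl (fun board row =>
    (PySem.List.pyRange 0 width 1).foldl (fun board col =>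
      PySem.List.pySetD board row
        (PySem.List.pySetD (PySem.List.pyGetD board row []) col
          (if row == col then (1 : Int) else 0))) board)
    (createBoard width height)

-- ===== PORT B =====
-- [0] * width is List.replicate width.toNat 0 (Python's list repetition, empty for width ≤ 0: exact).
def diagonalize_alt (width : Int) (height : Int) : List (List Int) :=
  let board := (PySem.List.pyRange 0 height 1).map (fun _ => List.replicate width.toNat (0 : Int))
  (PySem.List.pyRange 0 (min width height) 1).foldl
    (fun board i =>
      PySem.List.pySetD board i
        (PySem.List.pySetD (PySem.List.pyGetD board i []) i (1 : Int))) board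

-- ===== PRECONDITION & SPEC =====
def Spec_diagonalize (width : Int) (height : Int) (out : List (List Int)) : Prop := out = diagonalize_alt width height
instance (width : Int) (height : Int) (out : List (List Int)) : Decidable (Spec_diagonalize width height out) := by unfold Spec_diagonalize; infer_instance

-- ===== CLAIM (what is proved, stated in full; the proofs are below) =====
def Claim_equal_diagonalize : Prop := ∀ (width : Int) (height : Int), Dom_diagonalize width height → Spec_diagonalize width height (diagonalize width height)

-- ===== LEMMAS AND PROOFS =====

-- Generic row-update loop: folding `S` over `range n` where each step sets row r from its old value.
theorem foldl_set_rows {α : Type} (d : α) (S : List α → Nat → List α) (rowFun : Nat → α → α)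
    (hS : ∀ (b : List α) (r : Nat), r < b.length → S b r = b.set r (rowFun r (b.getD r d))) :
    ∀ (n : Nat) (b : List α), n ≤ b.length →
      (List.range n).foldl S b
        = (List.range n).map (fun r => rowFun r (b.getD r d)) ++ b.drop n := by
  intro n
  induction n with
  | zero => intro b _; simp
  | succ n ih =>
    intro b hb
    rw [List.range_succ, List.foldl_append, List.foldl_cons, List.foldl_nil,
      ih b (by omega)]
    have hlenmap : ((List.range n).map (fun r => rowFun r (b.getD r d))).length = n := by simp
    have hn : n < b.length := by omega
    have hP : n < ((List.range n).map (fun r => rowFun r (b.getD r d)) ++ b.drop n).length := by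
      simp; omega
    rw [hS _ n hP]
    have hget : ((List.range n).map (fun r => rowFun r (b.getD r d)) ++ b.drop n).getD n d
        = b.getD n d := by
      rw [List.getD_eq_getElem _ _ hP, List.getD_eq_getElem _ _ hn,
        List.getElem_append_right hlenmap.le]
      simp
    rw [hget]
    rw [List.set_append_right _ _ hlenmap.le, hlenmap, Nat.sub_self,
      List.drop_eq_getElem_cons hn, List.set_cons_zero]
    simp

-- A's inner column loop on a fixed row r only rewrites row r: pull the row update out.
theorem inner_to_row {β : Type} (v : Nat → β) (cols : List Nat) :
    ∀ (b : List (List β)) (r : Nat), r < b.length →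
      cols.foldl (fun b c => b.set r ((b.getD r []).set c (v c))) b
        = b.set r (cols.foldl (fun l c => l.set c (v c)) (b.getD r [])) := by
  induction cols with
  | nil =>
    intro b r hr
    simp [List.getD, List.getElem?_eq_getElem hr, List.set_getElem_self]
  | cons c cs ih =>
    intro b r hr
    simp only [List.foldl_cons]
    rw [ih _ r (by simpa using hr)]
    have hget : ((b.set r ((b.getD r []).set c (v c))).getD r [])
        = (b.getD r []).set c (v c) := by
      simp [List.getD, List.getElem?_set_self hr]
    rw [hget, List.set_set]

-- One diagonal row, closed form.
theorem row_eq (w j : Nat) :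
    (List.range w).map (fun c => if j = c then (1 : Int) else 0)
      = if j < w then (List.replicate w (0 : Int)).set j 1 else List.replicate w 0 := by
  apply List.ext_getElem
  · by_cases hjw : j < w <;> simp [hjw]
  · intro c hc hc'
    simp only [List.length_map, List.length_range] at hc
    rw [List.getElem_map, List.getElem_range]
    by_cases hjw : j < w
    · simp only [hjw, if_true]
      rw [List.getElem_set]
      by_cases hcj : c = j
      · subst hcj; simp
      · have h1 : ¬ j = c := fun e => hcj e.symm
        simp [h1]
    · simp only [hjw, if_false]
      have h1 : ¬ j = c := by omega
      simp [h1]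

-- Closed form of A.
theorem A_closed (w h : Int) :
    diagonalize w h
      = (List.range h.toNat).map
          (fun r => (List.range w.toNat).map (fun c => if r = c then (1 : Int) else 0)) := by
  have hrow : createOneRow w = List.replicate w.toNat (0 : Int) := by
    rw [createOneRow, PySem.List.pyRange_zero, List.foldl_map,
      PySem.List.foldl_append_singleton_eq_map (fun _ => (0 : Int)) (List.range w.toNat) []]
    simp [List.map_const']
  have hboard : createBoard w h = List.replicate h.toNat (List.replicate w.toNat (0 : Int)) := by
    rw [createBoard, PySem.List.pyRange_zero, List.foldl_map,
      PySem.List.foldl_append_singleton_eq_map (fun _ => createOneRow w) (List.range h.toNat) []]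
    simp [List.map_const', hrow]
  rw [diagonalize, hboard, PySem.List.pyRange_zero h, List.foldl_map]
  have hstep : ∀ (b : List (List Int)) (r : Nat), r < b.length →
      (PySem.List.pyRange 0 w 1).foldl (fun board col =>
          PySem.List.pySetD board (r : Int)
            (PySem.List.pySetD (PySem.List.pyGetD board (r : Int) []) col
              (if (r : Int) == col then (1 : Int) else 0))) b
        = b.set r ((List.range w.toNat).foldl
            (fun l c => l.set c (if r = c then (1 : Int) else 0)) (b.getD r [])) := by
    intro b r hr
    rw [PySem.List.pyRange_zero w, List.foldl_map]
    have : ∀ (b : List (List Int)) (c : Nat),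
        PySem.List.pySetD b (r : Int)
            (PySem.List.pySetD (PySem.List.pyGetD b (r : Int) []) (c : Int)
              (if (r : Int) == (c : Int) then (1 : Int) else 0))
          = b.set r ((b.getD r []).set c (if r = c then (1 : Int) else 0)) := by
      intro b c
      simp [PySem.List.pySetD_natCast, PySem.List.pyGetD_natCast, beq_iff_eq, Nat.cast_inj]
    simp only [this]
    exact inner_to_row (fun c => if r = c then (1 : Int) else 0) (List.range w.toNat) b r hr
  have := foldl_set_rows ([] : List Int)
      (fun b r => (PySem.List.pyRange 0 w 1).foldl (fun board col =>
          PySem.List.pySetD board (r : Int)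
            (PySem.List.pySetD (PySem.List.pyGetD board (r : Int) []) col
              (if (r : Int) == col then (1 : Int) else 0))) b)
      (fun r l => (List.range w.toNat).foldl
          (fun l c => l.set c (if r = c then (1 : Int) else 0)) l)
      hstep h.toNat (List.replicate h.toNat (List.replicate w.toNat (0 : Int))) (by simp)
  rw [this]
  simp only [List.drop_replicate, Nat.sub_self, List.replicate_zero, List.append_nil]
  apply List.map_congr_left
  intro r hr
  have hr' : r < h.toNat := List.mem_range.mp hr
  rw [List.getD_eq_getElem _ _ (by simpa using hr'), List.getElem_replicate]
  have := foldl_set_rows (0 : Int)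
      (fun l c => l.set c (if r = c then (1 : Int) else 0))
      (fun c _ => if r = c then (1 : Int) else 0)
      (fun _ _ _ => rfl) w.toNat (List.replicate w.toNat (0 : Int)) (by simp)
  rw [this]
  simp

-- Closed form of B.
theorem B_closed (w h : Int) :
    diagonalize_alt w h
      = (List.range (min w.toNat h.toNat)).map
            (fun i => (List.replicate w.toNat (0 : Int)).set i 1)
          ++ List.replicate (h.toNat - min w.toNat h.toNat)
              (List.replicate w.toNat (0 : Int)) := by
  have hmin : (min w h).toNat = min w.toNat h.toNat := by omega
  rw [diagonalize_alt]
  have hb0 : (PySem.List.pyRange 0 h 1).map (fun _ => List.replicate w.toNat (0 : Int))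
      = List.replicate h.toNat (List.replicate w.toNat (0 : Int)) := by
    rw [PySem.List.pyRange_zero h]
    simp [Function.comp_def, List.map_const']
  rw [hb0, PySem.List.pyRange_zero (min w h), hmin, List.foldl_map]
  have hstep : ∀ (b : List (List Int)) (i : Nat), i < b.length →
      PySem.List.pySetD b (i : Int)
          (PySem.List.pySetD (PySem.List.pyGetD b (i : Int) []) (i : Int) (1 : Int))
        = b.set i ((b.getD i []).set i (1 : Int)) := by
    intro b i _
    simp [PySem.List.pySetD_natCast, PySem.List.pyGetD_natCast]
  have := foldl_set_rows ([] : List Int)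
      (fun b i => PySem.List.pySetD b (i : Int)
          (PySem.List.pySetD (PySem.List.pyGetD b (i : Int) []) (i : Int) (1 : Int)))
      (fun i l => l.set i (1 : Int))
      hstep (min w.toNat h.toNat)
      (List.replicate h.toNat (List.replicate w.toNat (0 : Int)))
      (by simp)
  rw [this, List.drop_replicate]
  congr 1
  apply List.map_congr_left
  intro i hi
  have hi' : i < min w.toNat h.toNat := List.mem_range.mp hi
  rw [List.getD_eq_getElem _ _ (by simp only [List.length_replicate]; omega)]
  simp

-- The two closed forms coincide.
theorem closed_eq (w h : Nat) :
    (List.range h).map (fun r => (List.range w).map (fun c => if r = c then (1 : Int) else 0))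
      = (List.range (min w h)).map (fun i => (List.replicate w (0 : Int)).set i 1)
        ++ List.replicate (h - min w h) (List.replicate w (0 : Int)) := by
  apply List.ext_getElem
  · simp
  · intro j hj hj'
    simp only [List.length_map, List.length_range] at hj
    rw [List.getElem_map, List.getElem_range, row_eq]
    by_cases hjm : j < min w h
    · have hw : j < w := by omega
      rw [if_pos hw, List.getElem_append_left (by simp only [List.length_map, List.length_range]; omega), List.getElem_map,
        List.getElem_range]
    · have hw : ¬ j < w := by omega
      rw [if_neg hw, List.getElem_append_right (by simp only [List.length_map, List.length_range]; omega)]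
      simp

-- ===== VERDICT (by name: the statement is the Claim_ definition above) =====
theorem diagonalize_spec : Claim_equal_diagonalize := by
  intro width height _
  show diagonalize width height = diagonalize_alt width height
  rw [A_closed, B_closed, closed_eq]
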